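-- pv_equiv track=rewrite | github.com/barlowrm/What-happened-to-protein-complexes-in-genome-reduced-bacteria-python-scripts- | COGID Sorter --- Python Script/COGID Sorter.py | Make_COGID_DICT
-- ===== SOURCE A (Python) =====
-- def Make_COGID_DICT(imported_dict, input_list):
--     COGID_DICT = {}
--     #Creating a dictionary for oganization of the COGIDS that are found in the bacteria strains we intend to randomize
--
--     for k, v in imported_dict.items():
--         #Iterating through the master imported dictionary
--         COGID_DICT[k]=[]
--         #Saving all the keys from the imported dictionary to this one
--
--     no_duplicates = list(set(input_list))
--     #ECOLlist had duplicate COGIDS, using the set function I was able to get rid of duplicates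
--     #Since all we are interested in is organizing the COGIDs
--
--     for i in no_duplicates:
--         #Iterate through the the no duplicate list of COGIDS
--         for k, v in imported_dict.items():
--             #Look up the COGIDS in the master dictionary by iterating through the master dictionary
--             if i in v:
--                 # if the COGID is found
--                 COGID_DICT[k].append(i)
--                 #the COGID is added to the functional group it belongs to in the COGID_DICT
--
--     return COGID_DICT
-- ===== SOURCE B (Python) =====
-- def Make_COGID_DICT(imported_dict, input_list):
--     # Inverted index element -> list of keys whose value list contains it,
--     # built in one pass; then one lookup per unique COGID.
--     index = {}
--     for k, v in imported_dict.items():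
--         for x in set(v):
--             index.setdefault(x, []).append(k)
--     COGID_DICT = {k: [] for k in imported_dict}
--     for i in list(set(input_list)):
--         for k in index.get(i, []):
--             COGID_DICT[k].append(i)
--     return COGID_DICT
-- ===== Notes on version B (the rewrite author's own statement) =====
-- stated objective: faster
-- what changed: B builds an inverted index element->keys in one pass over the dict, then answers each unique COGID with a single index lookup, instead of A's rescan of every dict entry (with an 'i in v' scan) for every unique COGID.
import Mathlib
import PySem

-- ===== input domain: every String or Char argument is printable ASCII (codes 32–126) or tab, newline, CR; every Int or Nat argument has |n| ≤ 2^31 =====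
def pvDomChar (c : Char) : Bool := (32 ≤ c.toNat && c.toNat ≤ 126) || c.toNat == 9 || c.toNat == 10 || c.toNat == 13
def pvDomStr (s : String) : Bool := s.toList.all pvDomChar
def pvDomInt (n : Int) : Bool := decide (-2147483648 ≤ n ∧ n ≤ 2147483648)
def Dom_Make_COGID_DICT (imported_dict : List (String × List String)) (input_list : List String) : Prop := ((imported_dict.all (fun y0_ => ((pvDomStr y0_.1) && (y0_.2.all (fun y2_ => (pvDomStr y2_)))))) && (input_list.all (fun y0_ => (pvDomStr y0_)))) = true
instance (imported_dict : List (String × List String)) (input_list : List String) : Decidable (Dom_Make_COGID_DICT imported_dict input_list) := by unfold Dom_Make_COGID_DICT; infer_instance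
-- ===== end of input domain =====

-- B replaces A's scan of every dict entry per unique COGID by a one-pass inverted index
-- element → keys, then a single lookup per unique COGID (objective: faster, asymptotic).

-- ===== PORT A =====
def Make_COGID_DICT (imported_dict : List (String × List String)) (input_list : List String) : List (String × List String) :=
  let d0 := PySem.Dict.ofList imported_dict
  -- COGID_DICT = {}; for k, v in imported_dict.items(): COGID_DICT[k] = []
  let cog0 := d0.items.foldl (fun c p => c.insert p.1 ([] : List String)) PySem.Dict.empty
  -- no_duplicates = list(set(input_list)); modelled in first-insertion order (PySem.Set);
  -- B dedups via the identical set(), so both Pythons traverse it in the same order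
  let no_duplicates : PySem.Set String := PySem.Set.ofList input_list
  -- for i in no_duplicates: for k, v in imported_dict.items(): if i in v: COGID_DICT[k].append(i)
  (no_duplicates.foldl (fun c i =>
      d0.items.foldl (fun c p =>
        if i ∈ p.2 then c.modify p.1 [] (· ++ [i]) else c) c) cog0).items

-- ===== PORT B =====
def Make_COGID_DICT_alt (imported_dict : List (String × List String)) (input_list : List String) : List (String × List String) :=
  let d0 := PySem.Dict.ofList imported_dict
  -- index = {}; for k, v in ...: for x in set(v): index.setdefault(x, []).append(k)
  -- (each x updates its own index key, so the set's iteration order cannot affect the result)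
  let index := d0.items.foldl (fun ix p =>
      (PySem.Set.ofList p.2).foldl (fun ix x => ix.modify x ([] : List String) (· ++ [p.1])) ix)
    PySem.Dict.empty
  -- COGID_DICT = {k: [] for k in imported_dict}
  let cog0 := d0.items.foldl (fun c p => c.insert p.1 ([] : List String)) PySem.Dict.empty
  -- for i in list(set(input_list)): for k in index.get(i, []): COGID_DICT[k].append(i)
  -- modelled, like A's list(set(...)), in first-insertion order (PySem.Set)
  ((PySem.Set.ofList input_list : List String).foldl (fun c i =>
      (index.getD i []).foldl (fun c k => c.modify k [] (· ++ [i])) c) cog0).items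

-- ===== PRECONDITION & SPEC =====
def Spec_Make_COGID_DICT (imported_dict : List (String × List String)) (input_list : List String) (out : List (String × List String)) : Prop := out = Make_COGID_DICT_alt imported_dict input_list
instance (imported_dict : List (String × List String)) (input_list : List String) (out : List (String × List String)) : Decidable (Spec_Make_COGID_DICT imported_dict input_list out) := by unfold Spec_Make_COGID_DICT; infer_instance

-- ===== CLAIM (what is proved, stated in full; the proofs are below) =====
def Claim_equal_Make_COGID_DICT : Prop := ∀ (imported_dict : List (String × List String)) (input_list : List String), Dom_Make_COGID_DICT imported_dict input_list → Spec_Make_COGID_DICT imported_dict input_list (Make_COGID_DICT imported_dict input_list)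

-- ===== LEMMAS AND PROOFS =====

-- inner loop of B's index build: appends k to key i exactly when i occurs in xs
theorem getD_dedup_modify (xs : List String) (k i : String)
    (ix : PySem.Dict String (List String)) :
    ((PySem.Set.ofList xs).foldl (fun ix x => ix.modify x ([] : List String) (· ++ [k])) ix).getD i []
      = ix.getD i [] ++ (if i ∈ xs then [k] else []) := by
  have h1 : (PySem.Set.ofList xs).foldl (fun ix x => ix.modify x ([] : List String) (· ++ [k])) ix
      = ((PySem.Set.ofList xs).map (fun x => (x, k))).foldl (fun d p => d.modify p.1 [] (· ++ [p.2])) ix := by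
    rw [List.foldl_map]
  rw [h1, PySem.Dict.getD_foldl_modify_append]
  congr 1
  rw [List.filter_map]
  have h2 : (PySem.Set.ofList xs).filter ((fun p => p.1 == i) ∘ (fun x => (x, k)))
      = (PySem.Set.ofList xs).filter (· == i) := rfl
  rw [h2, List.filter_beq]
  by_cases hm : i ∈ xs
  · rw [List.count_eq_one_of_mem (PySem.Set.nodup_ofList xs) (by simpa [PySem.Set.mem_ofList] using hm)]
    simp [hm]
  · rw [List.count_eq_zero.mpr (by simpa [PySem.Set.mem_ofList] using hm)]
    simp [hm]

-- B's inverted index at key i lists, in dict order, the keys whose value list contains i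
theorem index_getD (items : List (String × List String)) (i : String)
    (ix : PySem.Dict String (List String)) :
    (items.foldl (fun ix p =>
        (PySem.Set.ofList p.2).foldl (fun ix x => ix.modify x ([] : List String) (· ++ [p.1])) ix) ix).getD i []
      = ix.getD i [] ++ (items.filter (fun p => decide (i ∈ p.2))).map (·.1) := by
  induction items generalizing ix with
  | nil => simp
  | cons p rest ih =>
    rw [List.foldl_cons, ih, getD_dedup_modify]
    by_cases hm : i ∈ p.2 <;> simp [hm]

-- one outer-loop step of A equals one outer-loop step of B
theorem step_eq (items : List (String × List String)) (i : String)
    (ixv : List String) (c : PySem.Dict String (List String))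
    (hix : ixv = (items.filter (fun p => decide (i ∈ p.2))).map (·.1)) :
    items.foldl (fun c p => if i ∈ p.2 then c.modify p.1 [] (· ++ [i]) else c) c
      = ixv.foldl (fun c k => c.modify k [] (· ++ [i])) c := by
  subst hix
  rw [List.foldl_map, List.foldl_filter]
  simp

-- ===== VERDICT (by name: the statement is the Claim_ definition above) =====
theorem Make_COGID_DICT_spec : Claim_equal_Make_COGID_DICT := by
  intro imported_dict input_list _
  unfold Spec_Make_COGID_DICT Make_COGID_DICT Make_COGID_DICT_alt
  dsimp only
  congr 1
  apply List.foldl_ext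
  intro c i _
  exact step_eq _ i _ c (by rw [index_getD]; simp)
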